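-- pv_equiv track=rewrite | github.com/coralynnkc/cs329-group | pos/scripts/score_baseline.py | build_pred_dict
-- ===== SOURCE A (Python) =====
-- SAMPLE_ID_VARIANTS = {"sample_id", "sample", "sampleid", "sample_num"}
--
-- SENT_ID_VARIANTS   = {"sentence_id", "sent_id", "sentid", "id"}
--
-- def normalise_keys(rows):
--     if not rows:
--         return rows
--     remap = {}
--     for k in rows[0].keys():
--         kl = k.strip().lower()
--         if kl in SAMPLE_ID_VARIANTS:
--             remap[k] = "sample_id"
--         elif kl in SENT_ID_VARIANTS:
--             remap[k] = "sentence_id"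
--     if not remap:
--         return rows
--     return [{remap.get(k, k): v for k, v in row.items()} for row in rows]
--
-- def pred_col(rows):
--     skip = SAMPLE_ID_VARIANTS | SENT_ID_VARIANTS
--     for col in rows[0].keys():
--         if col.strip().lower() not in skip:
--             return col
--     raise ValueError(f"Could not find prediction column in: {list(rows[0].keys())}")
--
-- def build_pred_dict(rows):
--     rows = normalise_keys(rows)
--     col = pred_col(rows)
--     result = {}
--     for r in rows:
--         sid  = str(r.get("sample_id", "1")).strip()
--         sent = str(r.get("sentence_id", "")).strip()
--         result[(sid, sent)] = r.get(col, "").strip()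
--     return result
-- ===== SOURCE B (Python) =====
-- SAMPLE_ID_VARIANTS = {"sample_id", "sample", "sampleid", "sample_num"}
--
-- SENT_ID_VARIANTS   = {"sentence_id", "sent_id", "sentid", "id"}
--
-- def build_pred_dict(rows):
--     # Index-first single pass: classify header keys once, then extract the three
--     # fields from each row directly, never building remapped row dicts.
--     skip = SAMPLE_ID_VARIANTS | SENT_ID_VARIANTS
--     header = list(rows[0].keys())
--     sample_keys = {k for k in header if k.strip().lower() in SAMPLE_ID_VARIANTS}
--     sent_keys   = {k for k in header if k.strip().lower() in SENT_ID_VARIANTS}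
--     col = next((k for k in header if k.strip().lower() not in skip), None)
--     if col is None:
--         raise ValueError(f"Could not find prediction column in: {header}")
--     result = {}
--     for r in rows:
--         sid, sent, pred = "1", "", ""
--         for k, v in r.items():
--             tgt = ("sample_id" if k in sample_keys
--                    else "sentence_id" if k in sent_keys
--                    else k)
--             if tgt == "sample_id":
--                 sid = v
--             elif tgt == "sentence_id":
--                 sent = v
--             elif tgt == col:
--                 pred = v
--         result[(str(sid).strip(), str(sent).strip())] = str(pred).strip()
--     return result
-- ===== Notes on version B (the rewrite author's own statement) =====
-- stated objective: simpler
-- what changed: A rebuilds a remapped dict for every row and then re-scans/looks keys up; B classifies the header keys once into sample/sentence/prediction columns and extracts the three fields in a single direct pass per row, never materialising remapped row dicts.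
import Mathlib
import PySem

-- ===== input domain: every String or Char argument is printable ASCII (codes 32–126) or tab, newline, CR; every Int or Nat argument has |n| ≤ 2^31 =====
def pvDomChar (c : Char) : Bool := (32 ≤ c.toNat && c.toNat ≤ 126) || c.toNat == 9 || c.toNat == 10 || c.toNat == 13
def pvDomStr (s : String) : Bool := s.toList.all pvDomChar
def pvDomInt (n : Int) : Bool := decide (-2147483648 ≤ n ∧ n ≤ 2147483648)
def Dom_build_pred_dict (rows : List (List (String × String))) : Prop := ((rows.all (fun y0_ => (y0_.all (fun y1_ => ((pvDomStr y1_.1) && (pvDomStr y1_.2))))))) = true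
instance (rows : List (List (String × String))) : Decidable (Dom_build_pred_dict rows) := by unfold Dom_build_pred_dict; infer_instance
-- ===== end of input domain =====

-- B replaces A's rebuild-remapped-row-dicts-then-look-up pipeline by an index-first single
-- pass: header keys are classified once, then each row is scanned once extracting the three
-- fields directly. Equivalence is proved on the RETURN value; each input row (a Python dict)
-- is marshalled by PySem.Dict.ofList in both ports.

-- shared module-level constants / tiny pure helpers (module constants in the Python too)
def pvSAMPLE : List String := ["sample_id", "sample", "sampleid", "sample_num"]
def pvSENT : List String := ["sentence_id", "sent_id", "sentid", "id"]
def pvNorm (k : String) : String := PySem.Str.lower (PySem.Str.strip k)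
def pvSkip (k : String) : Bool := pvSAMPLE.contains (pvNorm k) || pvSENT.contains (pvNorm k)

-- ===== PORT A =====
-- the loop body of normalise_keys' remap loop
def pvStepR (remap : PySem.Dict String String) (k : String) : PySem.Dict String String :=
  if pvSAMPLE.contains (pvNorm k) then remap.insert k "sample_id"
  else if pvSENT.contains (pvNorm k) then remap.insert k "sentence_id"
  else remap

def pvRemapA (header : List String) : PySem.Dict String String :=
  header.foldl pvStepR PySem.Dict.empty

-- {remap.get(k, k): v for k, v in row.items()}
def pvRemapRow (remap : PySem.Dict String String) (row : PySem.Dict String String) :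
    PySem.Dict String String :=
  row.items.foldl (fun d kv => d.insert (remap.getD kv.1 kv.1) kv.2) PySem.Dict.empty

def normalise_keysA (rows : List (PySem.Dict String String)) : List (PySem.Dict String String) :=
  match rows with
  | [] => rows
  | r0 :: _ =>
    let remap := pvRemapA r0.keys
    if remap.size = 0 then rows
    else rows.map (pvRemapRow remap)

-- none = the Python raises (IndexError on empty rows / ValueError when no column qualifies)
def pred_colA (rows : List (PySem.Dict String String)) : Option String :=
  match rows with
  | [] => none
  | r0 :: _ => r0.keys.find? (fun col => !pvSkip col)

def build_pred_dict (rows : List (List (String × String))) : List (String × String × String) :=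
  let dicts := rows.map PySem.Dict.ofList
  let dicts := normalise_keysA dicts
  match pred_colA dicts with
  | none => []
  | some col =>
    let result := dicts.foldl (fun result r =>
      let sid := PySem.Str.strip (r.getD "sample_id" "1")
      let sent := PySem.Str.strip (r.getD "sentence_id" "")
      result.insert (sid, sent) (PySem.Str.strip (r.getD col ""))) PySem.Dict.empty
    result.items.map (fun p => (p.1.1, p.1.2, p.2))

-- ===== PORT B =====
-- the per-row single-pass loop body of Source B ('for k, v in r.items(): …')
def pvStepB (sampleKeys sentKeys : PySem.Set String) (col : String)
    (acc : String × String × String) (kv : String × String) : String × String × String :=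
  let t := if PySem.Set.contains sampleKeys kv.1 then "sample_id"
           else if PySem.Set.contains sentKeys kv.1 then "sentence_id"
           else kv.1
  if t = "sample_id" then (kv.2, acc.2.1, acc.2.2)
  else if t = "sentence_id" then (acc.1, kv.2, acc.2.2)
  else if t = col then (acc.1, acc.2.1, kv.2)
  else acc

def build_pred_dict_alt (rows : List (List (String × String))) : List (String × String × String) :=
  let dicts := rows.map PySem.Dict.ofList
  match dicts with
  | [] => []   -- rows[0] raises IndexError
  | r0 :: _ =>
    let header := r0.keys
    let sampleKeys : PySem.Set String :=
      PySem.Set.ofList (header.filter (fun k => pvSAMPLE.contains (pvNorm k)))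
    let sentKeys : PySem.Set String :=
      PySem.Set.ofList (header.filter (fun k => pvSENT.contains (pvNorm k)))
    match header.find? (fun k => !pvSkip k) with
    | none => []   -- raises ValueError
    | some col =>
      let result := dicts.foldl (fun result r =>
        let acc := r.items.foldl (pvStepB sampleKeys sentKeys col) ("1", "", "")
        result.insert (PySem.Str.strip acc.1, PySem.Str.strip acc.2.1)
          (PySem.Str.strip acc.2.2)) PySem.Dict.empty
      result.items.map (fun p => (p.1.1, p.1.2, p.2))

-- ===== PRECONDITION & SPEC =====
-- Pre_ excludes exactly the inputs where the Python raises: empty rows (IndexError at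
-- rows[0]) and a first row with no key outside the id-variant sets (ValueError).
def Pre_build_pred_dict (rows : List (List (String × String))) : Prop :=
  rows ≠ [] ∧ (rows.headI.any (fun kv => !pvSkip kv.1)) = true
instance (rows : List (List (String × String))) : Decidable (Pre_build_pred_dict rows) := by
  unfold Pre_build_pred_dict; infer_instance

def pvWitness_build_pred_dict : (List (List (String × String))) :=
  [[("id", "1"), ("text", "hello world")], [("id", "2"), ("text", "bye")]]

def Spec_build_pred_dict (rows : List (List (String × String))) (out : List (String × String × String)) : Prop := out = build_pred_dict_alt rows
instance (rows : List (List (String × String))) (out : List (String × String × String)) : Decidable (Spec_build_pred_dict rows out) := by unfold Spec_build_pred_dict; infer_instance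

-- ===== CLAIM (what is proved, stated in full; the proofs are below) =====
def Claim_equal_build_pred_dict : Prop := ∀ (rows : List (List (String × String))), Dom_build_pred_dict rows → Pre_build_pred_dict rows → Spec_build_pred_dict rows (build_pred_dict rows)

-- ===== LEMMAS AND PROOFS =====

-- find? skips filtered-out elements when every hit passes the filter
theorem pv_find?_filter {α : Type} (p q : α → Bool) (l : List α)
    (h : ∀ y ∈ l, p y = true → q y = true) :
    List.find? p (l.filter q) = List.find? p l := by
  induction l with
  | nil => rfl
  | cons a l ih =>
    by_cases hq : q a = true
    · simp only [List.filter_cons, hq, if_true, List.find?_cons]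
      cases hp : p a <;> simp [ih fun y hy => h y (List.mem_cons_of_mem _ hy)]
    · have hp : p a = false := by
        cases hpa : p a
        · rfl
        · exact absurd (h a (List.mem_cons_self) hpa) hq
      simp only [List.filter_cons, hq, List.find?_cons, hp]
      exact ih fun y hy => h y (List.mem_cons_of_mem _ hy)

-- find? over set(xs) (first occurrences kept) = find? over xs
theorem pv_find?_ofList {α : Type} [BEq α] [LawfulBEq α] (p : α → Bool) (l : List α) :
    List.find? p (PySem.Set.ofList l) = List.find? p l := by
  induction l with
  | nil => rfl
  | cons a l ih =>
    rw [PySem.Set.ofList_cons]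
    cases hp : p a
    · simp only [List.find?_cons, hp]
      rw [show PySem.Set.discard (PySem.Set.ofList l) a
            = (PySem.Set.ofList l).filter (fun y => !y == a) from rfl]
      rw [pv_find?_filter _ _ _ ?_, ih]
      intro y _ hy
      simp only [Bool.not_eq_eq_eq_not, Bool.not_true, beq_eq_false_iff_ne, ne_eq]
      intro hya; subst hya; simp [hy] at hp
    · simp [hp]

-- the remap step leaves lookups at other keys unchanged
theorem pv_stepR_getD_ne (d : PySem.Dict String String) (x k : String) (h : ¬ x = k) :
    (pvStepR d x).getD k k = d.getD k k := by
  unfold pvStepR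
  have hk : ¬ k = x := fun hh => h hh.symm
  split_ifs <;> simp [PySem.Dict.getD_insert, hk]

theorem pv_stepR_getD_self (d : PySem.Dict String String) (k : String) :
    (pvStepR d k).getD k k =
      if pvSAMPLE.contains (pvNorm k) = true then "sample_id"
      else if pvSENT.contains (pvNorm k) = true then "sentence_id"
      else d.getD k k := by
  unfold pvStepR
  split_ifs <;> simp

-- characterization of the remap dict A builds from the header
theorem pv_remap_getD (ks : List String) (d : PySem.Dict String String) (k : String) :
    (ks.foldl pvStepR d).getD k k =
      if k ∈ ks ∧ pvSAMPLE.contains (pvNorm k) = true then "sample_id"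
      else if k ∈ ks ∧ pvSENT.contains (pvNorm k) = true then "sentence_id"
      else d.getD k k := by
  induction ks generalizing d with
  | nil => simp
  | cons x ks ih =>
    simp only [List.foldl_cons]
    rw [ih]
    by_cases hk : k ∈ ks
    · simp only [hk, List.mem_cons, or_true, true_and]
      split_ifs with hS hT
      · rfl
      · rfl
      · by_cases hxk : x = k
        · subst hxk
          rw [pv_stepR_getD_self, if_neg hS, if_neg hT]
        · exact pv_stepR_getD_ne d x k hxk
    · by_cases hxk : x = k
      · subst hxk
        simp only [hk, false_and, if_false, List.mem_cons, true_or, true_and]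
        rw [pv_stepR_getD_self]
      · have hmem : k ∉ x :: ks := by
          intro hm
          rcases List.mem_cons.mp hm with h | h
          · exact hxk h.symm
          · exact hk h
        rw [if_neg (fun hc => hk hc.1), if_neg (fun hc => hk hc.1),
            if_neg (fun hc => hmem hc.1), if_neg (fun hc => hmem hc.1)]
        exact pv_stepR_getD_ne d x k hxk

-- a size-zero dict is empty: every getD returns the default
theorem pv_getD_size_zero {κ ν : Type} [BEq κ] (d : PySem.Dict κ ν) (h : d.size = 0)
    (k : κ) (dflt : ν) : d.getD k dflt = dflt := by
  cases d with
  | mk items =>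
    cases items with
    | nil => rfl
    | cons a l => simp [PySem.Dict.size] at h

-- B's header-set classification computes exactly A's remap.get(k, k)
theorem pv_target_eq (header : List String) (k : String) :
    (if PySem.Set.contains (PySem.Set.ofList (header.filter (fun k => pvSAMPLE.contains (pvNorm k)))) k then "sample_id"
     else if PySem.Set.contains (PySem.Set.ofList (header.filter (fun k => pvSENT.contains (pvNorm k)))) k then "sentence_id"
     else k) = (pvRemapA header).getD k k := by
  rw [pvRemapA, pv_remap_getD]
  have hs : PySem.Set.contains (PySem.Set.ofList (header.filter (fun k => pvSAMPLE.contains (pvNorm k)))) k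
      = decide (k ∈ header ∧ pvSAMPLE.contains (pvNorm k) = true) := by
    simp [PySem.Set.contains, PySem.Set.mem_ofList, List.mem_filter]
  have ht : PySem.Set.contains (PySem.Set.ofList (header.filter (fun k => pvSENT.contains (pvNorm k)))) k
      = decide (k ∈ header ∧ pvSENT.contains (pvNorm k) = true) := by
    simp [PySem.Set.contains, PySem.Set.mem_ofList, List.mem_filter]
  rw [hs, ht]
  by_cases h1 : k ∈ header ∧ pvSAMPLE.contains (pvNorm k) = true
  · simp [h1]
  · by_cases h2 : k ∈ header ∧ pvSENT.contains (pvNorm k) = true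
    · simp [h2]
    · simp [h1, h2, PySem.Dict.getD_empty]

-- keys outside both variant sets are left alone by the remap
theorem pv_target_of_not_skip (header : List String) (k : String) (h : pvSkip k = false) :
    (pvRemapA header).getD k k = k := by
  rw [pvRemapA, pv_remap_getD]
  unfold pvSkip at h
  rw [Bool.or_eq_false_iff] at h
  have h1 : ¬(k ∈ header ∧ pvSAMPLE.contains (pvNorm k) = true) := fun hc => by
    have := h.1; rw [hc.2] at this; exact absurd this (by decide)
  have h2 : ¬(k ∈ header ∧ pvSENT.contains (pvNorm k) = true) := fun hc => by
    have := h.2; rw [hc.2] at this; exact absurd this (by decide)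
  rw [if_neg h1, if_neg h2, PySem.Dict.getD_empty]

-- remapping a key cannot change whether it is skipped
theorem pv_target_skip (header : List String) (k : String) :
    pvSkip ((pvRemapA header).getD k k) = pvSkip k := by
  rw [pvRemapA, pv_remap_getD]
  by_cases h1 : k ∈ header ∧ pvSAMPLE.contains (pvNorm k) = true
  · rw [if_pos h1]
    have hk : pvSkip k = true := by unfold pvSkip; rw [h1.2]; exact Bool.true_or _
    rw [hk]
    decide
  · by_cases h2 : k ∈ header ∧ pvSENT.contains (pvNorm k) = true
    · rw [if_neg h1, if_pos h2]
      have hk : pvSkip k = true := by unfold pvSkip; rw [h2.2]; exact Bool.or_true _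
      rw [hk]
      decide
    · rw [if_neg h1, if_neg h2, PySem.Dict.getD_empty]

-- rebuilding a nodup-keyed dict from its items is the identity
theorem pv_ofList_items (d : PySem.Dict String String) (h : d.keys.Nodup) :
    d.items.foldl (fun d kv => d.insert kv.1 kv.2) PySem.Dict.empty = d := by
  apply PySem.Dict.ext
  rw [show (fun (d : PySem.Dict String String) (kv : String × String) => d.insert kv.1 kv.2)
        = (fun d kv => d.insert ((fun (kv : String × String) => kv.1) kv)
            ((fun (_ : PySem.Dict String String) (kv : String × String) => kv.2) d kv)) from rfl]
  rw [PySem.Dict.items_foldl_insert_fresh]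
  · simp [PySem.Dict.empty]
  · intro a _; simp [PySem.Dict.contains_empty]
  · simpa [PySem.Dict.keys] using h

-- the single B-pass over a row equals the three lookups on the rebuilt dict
theorem pv_row_pass (tgt : String → String) (col : String)
    (h1 : col ≠ "sample_id") (h2 : col ≠ "sentence_id")
    (items : List (String × String)) : ∀ (d : PySem.Dict String String),
    items.foldl (fun acc kv =>
        if tgt kv.1 = "sample_id" then (kv.2, acc.2.1, acc.2.2)
        else if tgt kv.1 = "sentence_id" then (acc.1, kv.2, acc.2.2)
        else if tgt kv.1 = col then (acc.1, acc.2.1, kv.2)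
        else acc)
      (d.getD "sample_id" "1", d.getD "sentence_id" "", d.getD col "")
    = (let d' := items.foldl (fun d kv => d.insert (tgt kv.1) kv.2) d
       (d'.getD "sample_id" "1", d'.getD "sentence_id" "", d'.getD col "")) := by
  induction items with
  | nil => intro d; rfl
  | cons kv items ih =>
    intro d
    simp only [List.foldl_cons]
    have key : (if tgt kv.1 = "sample_id"
          then (kv.2, (d.getD "sample_id" "1", d.getD "sentence_id" "", d.getD col "").2.1,
                (d.getD "sample_id" "1", d.getD "sentence_id" "", d.getD col "").2.2)
          else if tgt kv.1 = "sentence_id"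
          then ((d.getD "sample_id" "1", d.getD "sentence_id" "", d.getD col "").1, kv.2,
                (d.getD "sample_id" "1", d.getD "sentence_id" "", d.getD col "").2.2)
          else if tgt kv.1 = col
          then ((d.getD "sample_id" "1", d.getD "sentence_id" "", d.getD col "").1,
                (d.getD "sample_id" "1", d.getD "sentence_id" "", d.getD col "").2.1, kv.2)
          else (d.getD "sample_id" "1", d.getD "sentence_id" "", d.getD col ""))
        = ((d.insert (tgt kv.1) kv.2).getD "sample_id" "1",
           (d.insert (tgt kv.1) kv.2).getD "sentence_id" "",
           (d.insert (tgt kv.1) kv.2).getD col "") := by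
      by_cases hA : tgt kv.1 = "sample_id"
      · simp [hA, PySem.Dict.getD_insert, h1, h2]
      · by_cases hB : tgt kv.1 = "sentence_id"
        · simp [hB, PySem.Dict.getD_insert, h2]
        · by_cases hC : tgt kv.1 = col
          · simp [hC, PySem.Dict.getD_insert, h1, h2, Ne.symm h1, Ne.symm h2]
          · rw [if_neg hA, if_neg hB, if_neg hC,
                PySem.Dict.getD_insert, PySem.Dict.getD_insert, PySem.Dict.getD_insert,
                if_neg (fun h => hA h.symm), if_neg (fun h => hB h.symm),
                if_neg (fun h => hC h.symm)]
    rw [key]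
    exact ih (d.insert (tgt kv.1) kv.2)

-- scanning the remapped header for the first non-id column = scanning the original header
theorem pv_pred_remap (d0 : PySem.Dict String String) :
    (pvRemapRow (pvRemapA d0.keys) d0).keys.find? (fun col => !pvSkip col)
      = d0.keys.find? (fun col => !pvSkip col) := by
  rw [pvRemapRow]
  rw [show (fun (d : PySem.Dict String String) (kv : String × String) =>
        d.insert ((pvRemapA d0.keys).getD kv.1 kv.1) kv.2)
      = (fun d kv => d.insert ((fun (kv : String × String) => (pvRemapA d0.keys).getD kv.1 kv.1) kv)
          ((fun (_ : PySem.Dict String String) (kv : String × String) => kv.2) d kv)) from rfl]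
  rw [PySem.Dict.keys_foldl_insert_key, PySem.Dict.keys_empty, PySem.Set.update_nil_left,
    pv_find?_ofList, List.find?_map]
  rw [show d0.keys = d0.items.map (fun p => p.1) from rfl, List.find?_map]
  have hp : ((fun col => !pvSkip col) ∘ fun (kv : String × String) =>
        (pvRemapA (d0.items.map (fun p => p.1))).getD kv.1 kv.1)
      = ((fun col => !pvSkip col) ∘ fun (p : String × String) => p.1) := by
    funext kv
    simp only [Function.comp]
    rw [pv_target_skip]
  rw [hp]
  cases hfind : (d0.items.find? ((fun col => !pvSkip col) ∘ fun (p : String × String) => p.1)) with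
  | none => rfl
  | some kv =>
    have hskip : pvSkip kv.1 = false := by
      have := List.find?_some hfind
      simpa using this
    simp only [Option.map_some]
    rw [pv_target_of_not_skip _ _ hskip]


-- the B-side per-row pass, with B's header sets, computes A's three lookups
theorem pv_row_B (header : List String) (col : String)
    (h1 : col ≠ "sample_id") (h2 : col ≠ "sentence_id") (items : List (String × String)) :
    items.foldl (pvStepB
        (PySem.Set.ofList (header.filter (fun k => pvSAMPLE.contains (pvNorm k))))
        (PySem.Set.ofList (header.filter (fun k => pvSENT.contains (pvNorm k)))) col)
      ("1", "", "")
    = ((items.foldl (fun d kv => d.insert ((pvRemapA header).getD kv.1 kv.1) kv.2) PySem.Dict.empty).getD "sample_id" "1",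
       (items.foldl (fun d kv => d.insert ((pvRemapA header).getD kv.1 kv.1) kv.2) PySem.Dict.empty).getD "sentence_id" "",
       (items.foldl (fun d kv => d.insert ((pvRemapA header).getD kv.1 kv.1) kv.2) PySem.Dict.empty).getD col "") := by
  have hstep : pvStepB
        (PySem.Set.ofList (header.filter (fun k => pvSAMPLE.contains (pvNorm k))))
        (PySem.Set.ofList (header.filter (fun k => pvSENT.contains (pvNorm k)))) col
      = (fun acc kv =>
          if (pvRemapA header).getD kv.1 kv.1 = "sample_id" then (kv.2, acc.2.1, acc.2.2)
          else if (pvRemapA header).getD kv.1 kv.1 = "sentence_id" then (acc.1, kv.2, acc.2.2)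
          else if (pvRemapA header).getD kv.1 kv.1 = col then (acc.1, acc.2.1, kv.2)
          else acc) := by
    funext acc kv
    unfold pvStepB
    rw [pv_target_eq]
  rw [hstep]
  have hbase : (("1", "", "") : String × String × String)
      = ((PySem.Dict.empty : PySem.Dict String String).getD "sample_id" "1",
         (PySem.Dict.empty : PySem.Dict String String).getD "sentence_id" "",
         (PySem.Dict.empty : PySem.Dict String String).getD col "") := by
    simp [PySem.Dict.getD_empty]
  rw [hbase]
  simpa using pv_row_pass (fun k => (pvRemapA header).getD k k) col h1 h2 items PySem.Dict.empty

-- an empty remap leaves every row dict unchanged when rebuilt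
theorem pv_rebuild_id (remap : PySem.Dict String String) (hz : remap.size = 0)
    (r : PySem.Dict String String) (hnd : r.keys.Nodup) :
    r.items.foldl (fun d kv => d.insert (remap.getD kv.1 kv.1) kv.2) PySem.Dict.empty = r := by
  have hfun : (fun (d : PySem.Dict String String) (kv : String × String) =>
        d.insert (remap.getD kv.1 kv.1) kv.2)
      = (fun d kv => d.insert kv.1 kv.2) := by
    funext d kv
    rw [pv_getD_size_zero remap hz]
  rw [hfun]
  exact pv_ofList_items r hnd

-- the two ports agree on every input
theorem pv_main (rows : List (List (String × String))) :
    build_pred_dict rows = build_pred_dict_alt rows := by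
  cases rows with
  | nil => rfl
  | cons row0 rest =>
    have hcolne : ∀ col : String, pvSkip col = false → col ≠ "sample_id" ∧ col ≠ "sentence_id" := by
      intro col h
      constructor
      · intro hcol; subst hcol; exact absurd h (by decide)
      · intro hcol; subst hcol; exact absurd h (by decide)
    simp only [build_pred_dict, build_pred_dict_alt, List.map_cons]
    by_cases hz : (pvRemapA (PySem.Dict.ofList row0).keys).size = 0
    · rw [show normalise_keysA (PySem.Dict.ofList row0 :: rest.map PySem.Dict.ofList)
            = PySem.Dict.ofList row0 :: rest.map PySem.Dict.ofList from by
        unfold normalise_keysA; simp [hz]]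
      rw [show pred_colA (PySem.Dict.ofList row0 :: rest.map PySem.Dict.ofList)
            = (PySem.Dict.ofList row0).keys.find? (fun col => !pvSkip col) from rfl]
      cases hfind : (PySem.Dict.ofList row0).keys.find? (fun col => !pvSkip col) with
      | none => rfl
      | some col =>
        have hskip : pvSkip col = false := by simpa using List.find?_some hfind
        obtain ⟨h1, h2⟩ := hcolne col hskip
        refine congrArg (fun d : PySem.Dict (String × String) String =>
          d.items.map (fun p => (p.1.1, p.1.2, p.2))) ?_
        apply PySem.List.foldl_congr_mem
        intro res r hr
        have hr' : r ∈ (row0 :: rest).map PySem.Dict.ofList := by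
          simpa using hr
        obtain ⟨row, _, rfl⟩ := List.mem_map.mp hr'
        rw [pv_row_B _ col h1 h2,
          pv_rebuild_id _ hz _ (PySem.Dict.nodup_keys_ofList row)]
    · rw [show normalise_keysA (PySem.Dict.ofList row0 :: rest.map PySem.Dict.ofList)
            = (PySem.Dict.ofList row0 :: rest.map PySem.Dict.ofList).map
                (pvRemapRow (pvRemapA (PySem.Dict.ofList row0).keys)) from by
        unfold normalise_keysA; simp [hz]]
      rw [show pred_colA ((PySem.Dict.ofList row0 :: rest.map PySem.Dict.ofList).map
                (pvRemapRow (pvRemapA (PySem.Dict.ofList row0).keys)))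
            = (pvRemapRow (pvRemapA (PySem.Dict.ofList row0).keys)
                (PySem.Dict.ofList row0)).keys.find? (fun col => !pvSkip col) from rfl]
      rw [pv_pred_remap]
      cases hfind : (PySem.Dict.ofList row0).keys.find? (fun col => !pvSkip col) with
      | none => rfl
      | some col =>
        have hskip : pvSkip col = false := by simpa using List.find?_some hfind
        obtain ⟨h1, h2⟩ := hcolne col hskip
        refine congrArg (fun d : PySem.Dict (String × String) String =>
          d.items.map (fun p => (p.1.1, p.1.2, p.2))) ?_
        rw [List.foldl_map]
        apply PySem.List.foldl_congr_mem
        intro res r hr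
        rw [pv_row_B _ col h1 h2]
        rfl

-- ===== VERDICT (by name: the statement is the Claim_ definition above) =====
theorem build_pred_dict_spec : Claim_equal_build_pred_dict := by
  intro rows _hdom _hpre
  unfold Spec_build_pred_dict
  exact pv_main rows
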